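-- pv_equiv track=rewrite | github.com/Etrama/leetcode-solutions | valid-sudoku/valid-sudoku.py | validSquare
-- ===== SOURCE A (Python) =====
-- import collections
--
-- def validSquare(board):
--     middle_squares = [(1,1), (1,4), (1,7),
--                        (4,1), (4,4), (4,7),
--                        (7,1), (7,4), (7,7),]
--     for square in middle_squares:
--         temp = []
--         temp.append(board[square[0]][square[1]]) #middle
--         temp.append(board[square[0]-1][square[1]-1]) #top left
--         temp.append(board[square[0]+1][square[1]+1]) #bottom right
--         temp.append(board[square[0]][square[1]-1])
--         temp.append(board[square[0]][square[1]+1])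
--         temp.append(board[square[0]-1][square[1]])
--         temp.append(board[square[0]+1][square[1]])
--         temp.append(board[square[0]+1][square[1]-1])
--         temp.append(board[square[0]-1][square[1]+1])
--         count_dict = collections.Counter(temp)
--         for key, value in count_dict.items():
--             if key != "." and value > 1:
--                 return False
--     return True
-- ===== SOURCE B (Python) =====
-- def validSquare(board):
--     for br in (0, 3, 6):
--         for bc in (0, 3, 6):
--             vals = sorted(board[br + i][bc + j]
--                           for i in range(3) for j in range(3)
--                           if board[br + i][bc + j] != ".")
--             for a, b in zip(vals, vals[1:]):
--                 if a == b:
--                     return False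
--     return True
-- ===== Notes on version B (the rewrite author's own statement) =====
-- stated objective: alternative
-- what changed: Per 3x3 box B sorts the non-'.' cell values and detects a duplicate as two equal adjacent entries of the sorted list, instead of A's building a Counter over a hand-enumerated neighbour list and rescanning its items for a count > 1.
import Mathlib
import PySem

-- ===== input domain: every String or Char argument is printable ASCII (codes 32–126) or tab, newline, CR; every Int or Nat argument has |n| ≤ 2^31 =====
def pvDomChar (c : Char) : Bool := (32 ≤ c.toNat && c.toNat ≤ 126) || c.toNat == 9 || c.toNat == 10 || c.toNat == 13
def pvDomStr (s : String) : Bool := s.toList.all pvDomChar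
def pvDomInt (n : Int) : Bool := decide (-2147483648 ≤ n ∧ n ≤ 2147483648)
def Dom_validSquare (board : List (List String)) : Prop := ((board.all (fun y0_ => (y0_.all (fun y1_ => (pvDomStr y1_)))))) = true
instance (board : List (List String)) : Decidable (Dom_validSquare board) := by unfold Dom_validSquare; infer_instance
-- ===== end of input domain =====

-- B replaces A's per-box Counter-and-rescan with sorting each box's non-'.' values and scanning adjacent pairs for an equal neighbour (objective: alternative).


-- ===== PORT A =====
-- board[r][c]; a raising access (none) becomes "" — wherever the Python returns, every cell it read was in range
def pvCell (board : List (List String)) (r c : Int) : String :=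
  (PySem.List.pyGet? ((PySem.List.pyGet? board r).getD []) c).getD ""

-- the nine temp.append(...) lines, in A's order
def pvTempA (board : List (List String)) (r c : Int) : List String :=
  [pvCell board r c, pvCell board (r-1) (c-1), pvCell board (r+1) (c+1),
   pvCell board r (c-1), pvCell board r (c+1), pvCell board (r-1) c,
   pvCell board (r+1) c, pvCell board (r+1) (c-1), pvCell board (r-1) (c+1)]

-- 'for key, value in count_dict.items(): if key != "." and value > 1: return False'
def pvBadA (board : List (List String)) (r c : Int) : Bool :=
  (PySem.Dict.counter (pvTempA board r c)).items.any (fun kv => kv.1 ≠ "." && kv.2 > 1)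

def pvLoopA (board : List (List String)) : List (Int × Int) → Bool
  | [] => true
  | (r, c) :: rest => if pvBadA board r c then false else pvLoopA board rest

def validSquare (board : List (List String)) : Bool :=
  pvLoopA board [(1,1), (1,4), (1,7), (4,1), (4,4), (4,7), (7,1), (7,4), (7,7)]

-- ===== PORT B =====
-- the generator 'board[br+i][bc+j] for i in range(3) for j in range(3) if … != "."' (range(3) = [0,1,2])
def pvBoxCellsB (board : List (List String)) (br bc : Int) : List String :=
  (([0, 1, 2] : List Int).flatMap (fun i =>
    ([0, 1, 2] : List Int).map (fun j => pvCell board (br + i) (bc + j)))).filter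
    (fun v => v ≠ ".")

-- vals = sorted(…)
def pvValsB (board : List (List String)) (br bc : Int) : List String :=
  PySem.List.sorted (pvBoxCellsB board br bc) (fun x => x) false

-- 'for a, b in zip(vals, vals[1:]): if a == b: return False'  (vals[1:] = drop 1, exact here)
def pvZipDup (vals : List String) : Bool :=
  (vals.zip (vals.drop 1)).any (fun p => p.1 == p.2)

def pvLoopB (board : List (List String)) : List (Int × Int) → Bool
  | [] => true
  | (br, bc) :: rest =>
      if pvZipDup (pvValsB board br bc) then false else pvLoopB board rest

def validSquare_alt (board : List (List String)) : Bool :=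
  pvLoopB board [(0,0), (0,3), (0,6), (3,0), (3,3), (3,6), (6,0), (6,3), (6,6)]

-- ===== PRECONDITION & SPEC =====
-- Pre_: exactly the boards on which Python A returns: either every 3x3 box is fully in
-- range, or some in-range prefix of the boxes (in A's order) ends in a box holding a
-- repeated non-"." value, where A early-returns False before any out-of-range access.
def pvOriginsN : List (Nat × Nat) := [(0,0), (0,3), (0,6), (3,0), (3,3), (3,6), (6,0), (6,3), (6,6)]
def pvCellN (board : List (List String)) (r c : Nat) : String := (board.getD r []).getD c ""
def pvBoxCellsN (board : List (List String)) (p : Nat × Nat) : List String :=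
  (List.range 3).flatMap (fun i => (List.range 3).map (fun j => pvCellN board (p.1 + i) (p.2 + j)))
def pvBoxReadable (board : List (List String)) (p : Nat × Nat) : Bool :=
  decide (p.1 + 3 ≤ board.length) &&
    (List.range 3).all (fun i => decide (p.2 + 3 ≤ (board.getD (p.1 + i) []).length))
def pvBoxDup (board : List (List String)) (p : Nat × Nat) : Bool :=
  (pvBoxCellsN board p).any (fun x => x ≠ "." && decide (2 ≤ (pvBoxCellsN board p).count x))
def Pre_validSquare (board : List (List String)) : Prop :=
  (pvOriginsN.all (pvBoxReadable board) ||
    (List.range 9).any (fun k =>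
      (pvOriginsN.take (k+1)).all (pvBoxReadable board) &&
        pvBoxDup board (pvOriginsN.getD k (0,0)))) = true
instance (board : List (List String)) : Decidable (Pre_validSquare board) := by
  unfold Pre_validSquare; infer_instance
def pvWitness_validSquare : List (List String) :=
  List.replicate 9 (List.replicate 9 ".")
def Spec_validSquare (board : List (List String)) (out : Bool) : Prop := out = validSquare_alt board
instance (board : List (List String)) (out : Bool) : Decidable (Spec_validSquare board out) := by unfold Spec_validSquare; infer_instance

-- ===== CLAIM (what is proved, stated in full; the proofs are below) =====
def Claim_equal_validSquare : Prop := ∀ (board : List (List String)), Dom_validSquare board → Pre_validSquare board → Spec_validSquare board (validSquare board)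

-- ===== LEMMAS AND PROOFS =====

-- A's per-box Counter check finds exactly a repeated non-"." value
lemma badA_iff (board : List (List String)) (r c : Int) :
    pvBadA board r c = true ↔ ∃ x, x ≠ "." ∧ 2 ≤ (pvTempA board r c).count x := by
  unfold pvBadA
  rw [PySem.Dict.items_counter]
  simp only [List.any_map, List.any_eq_true, Function.comp]
  constructor
  · rintro ⟨x, _, hx⟩
    simp only [Bool.and_eq_true, decide_eq_true_eq] at hx
    exact ⟨x, hx.1, by omega⟩
  · rintro ⟨x, hne, hcnt⟩
    refine ⟨x, ?_, ?_⟩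
    · rw [PySem.Set.mem_ofList]
      exact List.count_pos_iff.mp (by omega)
    · simp only [Bool.and_eq_true, decide_eq_true_eq]
      exact ⟨hne, by exact_mod_cast by omega⟩

-- adjacent equal pair in a ≤-sorted list ↔ some value occurs twice
lemma zipDup_iff (l : List String) (h : l.Pairwise (· ≤ ·)) :
    pvZipDup l = true ↔ ∃ x, 2 ≤ l.count x := by
  induction l with
  | nil => simp [pvZipDup]
  | cons a t ih =>
    rcases List.pairwise_cons.mp h with ⟨ha, ht⟩
    cases t with
    | nil =>
      constructor
      · intro hf; simp [pvZipDup] at hf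
      · rintro ⟨x, hx⟩
        by_cases hxa : a = x <;> simp [hxa] at hx
    | cons b t' =>
      have hab : a ≤ b := ha b List.mem_cons_self
      rw [show pvZipDup (a :: b :: t') = ((a == b) || pvZipDup (b :: t')) from by
        simp [pvZipDup]]
      by_cases he : a = b
      · subst he
        simp only [beq_self_eq_true, Bool.true_or, true_iff]
        exact ⟨a, by simp⟩
      · have halt : a < b := lt_of_le_of_ne hab he
        rw [show (a == b) = false from beq_eq_false_iff_ne.mpr he, Bool.false_or]
        rw [ih ht]
        have hanotin : a ∉ b :: t' := by
          intro hmem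
          rcases List.mem_cons.mp hmem with rfl | hm
          · exact he rfl
          · exact absurd ((List.pairwise_cons.mp ht).1 a hm) (not_le.mpr halt)
        constructor
        · rintro ⟨x, hx⟩
          refine ⟨x, ?_⟩
          rw [List.count_cons]
          split <;> omega
        · rintro ⟨x, hx⟩
          by_cases hxa : x = a
          · subst hxa
            rw [List.count_cons_self, List.count_eq_zero_of_not_mem hanotin] at hx
            omega
          · exact ⟨x, by rwa [List.count_cons_of_ne (Ne.symm hxa)] at hx⟩

-- counts in A's temp list and B's box cell list agree (both list the same nine cells)
lemma count_cells (board : List (List String)) (r c : Int) (x : String) :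
    (pvTempA board r c).count x =
      ((([0, 1, 2] : List Int).flatMap (fun i =>
        ([0, 1, 2] : List Int).map (fun j => pvCell board ((r-1) + i) ((c-1) + j))))).count x := by
  have h0 : (r-1) + (0:Int) = r - 1 := by ring
  have h1 : (r-1) + (1:Int) = r := by ring
  have h2 : (r-1) + (2:Int) = r + 1 := by ring
  have k0 : (c-1) + (0:Int) = c - 1 := by ring
  have k1 : (c-1) + (1:Int) = c := by ring
  have k2 : (c-1) + (2:Int) = c + 1 := by ring
  simp only [pvTempA, List.flatMap_cons, List.flatMap_nil, List.map_cons, List.map_nil,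
    List.append_nil, List.count_append, h0, h1, h2, k0, k1, k2, List.count_cons, List.count_nil]
  omega

-- per-box equivalence: A's duplicate test at middle (r,c) is the negation of B's box test at origin (r-1,c-1)
lemma box_eq (board : List (List String)) (r c : Int) :
    pvBadA board r c = pvZipDup (pvValsB board (r-1) (c-1)) := by
  have hsorted : (pvValsB board (r-1) (c-1)).Pairwise (· ≤ ·) :=
    PySem.List.sorted_pairwise _ _
  have hperm : (pvValsB board (r-1) (c-1)).Perm (pvBoxCellsB board (r-1) (c-1)) :=
    PySem.List.sorted_perm _ _ _
  have hiff : pvBadA board r c = true ↔ pvZipDup (pvValsB board (r-1) (c-1)) = true := by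
    rw [badA_iff, zipDup_iff _ hsorted]
    constructor
    · rintro ⟨x, hne, hc⟩
      refine ⟨x, ?_⟩
      rw [hperm.count_eq]
      unfold pvBoxCellsB
      rw [List.count_filter (by simpa using hne)]
      rw [count_cells board r c x] at hc
      exact hc
    · rintro ⟨x, hc⟩
      rw [hperm.count_eq] at hc
      unfold pvBoxCellsB at hc
      have hne : x ≠ "." := by
        intro he; subst he
        rw [List.count_eq_zero_of_not_mem (by simp [List.mem_filter])] at hc
        omega
      refine ⟨x, hne, ?_⟩
      rw [List.count_filter (by simpa using hne)] at hc
      rw [count_cells board r c x]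
      exact hc
  cases hb : pvZipDup (pvValsB board (r-1) (c-1)) with
  | true => exact hiff.mpr hb
  | false =>
    cases hba : pvBadA board r c with
    | false => rfl
    | true => rw [hb] at hiff; exact absurd (hiff.mp hba) (by simp)

-- ===== VERDICT (by name: the statement is the Claim_ definition above) =====
theorem validSquare_spec : Claim_equal_validSquare := by
  intro board _ _
  unfold Spec_validSquare validSquare validSquare_alt
  simp only [pvLoopA, pvLoopB]
  have e : ∀ r c : Int, pvBadA board r c = pvZipDup (pvValsB board (r-1) (c-1)) := box_eq board
  have e11 := e 1 1;  have e14 := e 1 4;  have e17 := e 1 7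
  have e41 := e 4 1;  have e44 := e 4 4;  have e47 := e 4 7
  have e71 := e 7 1;  have e74 := e 7 4;  have e77 := e 7 7
  norm_num at e11 e14 e17 e41 e44 e47 e71 e74 e77
  rw [e11, e14, e17, e41, e44, e47, e71, e74, e77]
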